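-- pv_equiv track=rewrite | github.com/SuperScript-PRC/ToolDeltaMod | extensions/richer_text/parser.py | parse_to_group
-- ===== SOURCE A (Python) =====
-- def parse_to_group(text):
--     # type: (str) -> list[tuple[bool, str]]
--     cached_param = ""
--     groups = []  # type: list[tuple[bool, str]]
--     ignore_flag = False
--     text = text.replace("\n\n", "\n \n")
--     for char in text:
--         if ignore_flag:
--             cached_param += char
--             ignore_flag = False
--         elif char == "\\":
--             ignore_flag = True
--             continue
--         elif char == "\n":
--             groups.append((False, cached_param))
--             cached_param = ""
--             groups.append((True, "br"))
--             continue
--         elif char == "<":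
--             groups.append((False, cached_param))
--             cached_param = ""
--         elif char == ">":
--             groups.append((True, cached_param))
--             cached_param = ""
--         else:
--             cached_param += char
--     if cached_param.strip():
--         groups.append((False, cached_param))
--     return groups
-- ===== SOURCE B (Python) =====
-- def parse_to_group(text):
--     # type: (str) -> list[tuple[bool, str]]
--     # Run-based scanner: consumes escape pairs and plain-character runs at once
--     # instead of maintaining a per-character ignore flag.
--     text = text.replace("\n\n", "\n \n")
--     groups = []
--     buf = []
--     i, n = 0, len(text)
--     while i < n:
--         c = text[i]
--         if c == "\\":
--             if i + 1 < n:
--                 buf.append(text[i + 1])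
--             i += 2
--         elif c == "\n":
--             groups.append((False, "".join(buf)))
--             groups.append((True, "br"))
--             buf = []
--             i += 1
--         elif c == "<":
--             groups.append((False, "".join(buf)))
--             buf = []
--             i += 1
--         elif c == ">":
--             groups.append((True, "".join(buf)))
--             buf = []
--             i += 1
--         else:
--             j = i + 1
--             while j < n and text[j] not in "\\\n<>":
--                 j += 1
--             buf.append(text[i:j])
--             i = j
--     tail = "".join(buf)
--     if tail.strip():
--         groups.append((False, tail))
--     return groups
-- ===== Notes on version B (the rewrite author's own statement) =====
-- stated objective: alternative
-- what changed: Replaced the per-character loop with an ignore_flag by an index-based scanner that consumes escape pairs ('\'+next char) and whole runs of plain characters at once, accumulating the current group in a list joined on emission.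
import Mathlib
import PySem

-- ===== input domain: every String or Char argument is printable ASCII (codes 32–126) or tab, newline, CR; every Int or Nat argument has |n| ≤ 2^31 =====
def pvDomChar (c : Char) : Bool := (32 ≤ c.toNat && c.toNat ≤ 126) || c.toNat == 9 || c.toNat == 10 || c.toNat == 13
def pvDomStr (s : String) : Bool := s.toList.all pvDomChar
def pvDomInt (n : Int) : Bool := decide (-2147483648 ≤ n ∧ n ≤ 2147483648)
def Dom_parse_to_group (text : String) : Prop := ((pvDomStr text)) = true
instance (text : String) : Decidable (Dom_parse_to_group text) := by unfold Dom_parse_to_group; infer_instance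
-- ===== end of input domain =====

-- B replaces A's per-character ignore_flag loop by a scanner that consumes escape
-- pairs and whole plain-character runs at once (objective: alternative decomposition).

-- ===== PORT A =====
-- loop body of A's 'for char in text' over state (cached_param, groups, ignore_flag)
def aStep (st : List Char × List (Bool × String) × Bool) (char : Char) :
    List Char × List (Bool × String) × Bool :=
  if st.2.2 then (st.1 ++ [char], st.2.1, false)
  else if char = '\\' then (st.1, st.2.1, true)
  else if char = '\n' then ([], st.2.1 ++ [(false, String.ofList st.1), (true, "br")], false)
  else if char = '<' then ([], st.2.1 ++ [(false, String.ofList st.1)], false)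
  else if char = '>' then ([], st.2.1 ++ [(true, String.ofList st.1)], false)
  else (st.1 ++ [char], st.2.1, false)

-- A's tail: 'if cached_param.strip(): groups.append((False, cached_param))'
def aFinish (st : List Char × List (Bool × String) × Bool) : List (Bool × String) :=
  if PySem.Chars.strip st.1 ≠ [] then st.2.1 ++ [(false, String.ofList st.1)] else st.2.1

def parse_to_group (text : String) : List (Bool × String) :=
  aFinish ((PySem.Str.replace text "\n\n" "\n \n").toList.foldl aStep ([], [], false))

-- ===== PORT B =====
-- Source B's inner while loop: the run of characters before the next special one
def altRun (l : List Char) : List Char × List Char :=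
  match l with
  | [] => ([], [])
  | c :: rest =>
    if c = '\\' ∨ c = '\n' ∨ c = '<' ∨ c = '>' then ([], c :: rest)
    else
      let p := altRun rest
      (c :: p.1, p.2)

theorem altRun_len (l : List Char) : (altRun l).2.length ≤ l.length := by
  induction l with
  | nil => simp [altRun]
  | cons c rest ih =>
    rw [altRun]
    split
    · simp
    · simpa using Nat.le_succ_of_le ih

-- Source B's outer while loop over (remaining text, buf)
def altGo (l : List Char) (buf : List Char) : List (Bool × String) :=
  match l with
  | [] => if PySem.Chars.strip buf ≠ [] then [(false, String.ofList buf)] else []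
  | c :: rest =>
    if c = '\\' then
      match rest with
      | [] => altGo [] buf
      | d :: rest' => altGo rest' (buf ++ [d])
    else if c = '\n' then (false, String.ofList buf) :: (true, "br") :: altGo rest []
    else if c = '<' then (false, String.ofList buf) :: altGo rest []
    else if c = '>' then (true, String.ofList buf) :: altGo rest []
    else altGo (altRun rest).2 (buf ++ c :: (altRun rest).1)
termination_by l.length
decreasing_by
  all_goals simp
  all_goals first
    | omega
    | exact altRun_len rest

def parse_to_group_alt (text : String) : List (Bool × String) :=
  altGo (PySem.Str.replace text "\n\n" "\n \n").toList []

-- ===== PRECONDITION & SPEC =====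
def Spec_parse_to_group (text : String) (out : List (Bool × String)) : Prop := out = parse_to_group_alt text
instance (text : String) (out : List (Bool × String)) : Decidable (Spec_parse_to_group text out) := by unfold Spec_parse_to_group; infer_instance

-- ===== CLAIM (what is proved, stated in full; the proofs are below) =====
def Claim_equal_parse_to_group : Prop := ∀ (text : String), Dom_parse_to_group text → Spec_parse_to_group text (parse_to_group text)

-- ===== LEMMAS AND PROOFS =====

theorem altGo_nil (buf : List Char) :
    altGo [] buf =
      if PySem.Chars.strip buf ≠ [] then [(false, String.ofList buf)] else [] := by
  rw [altGo.eq_def]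

theorem altGo_cons (c : Char) (rest buf : List Char) :
    altGo (c :: rest) buf =
      (if c = '\\' then
        match rest with
        | [] => altGo [] buf
        | d :: rest' => altGo rest' (buf ++ [d])
      else if c = '\n' then (false, String.ofList buf) :: (true, "br") :: altGo rest []
      else if c = '<' then (false, String.ofList buf) :: altGo rest []
      else if c = '>' then (true, String.ofList buf) :: altGo rest []
      else altGo (altRun rest).2 (buf ++ c :: (altRun rest).1)) := by
  rw [altGo.eq_def]

-- groups are only appended to: the initial group list is a prefix that can be factored out
theorem foldl_aStep_groups (l : List Char) (cached : List Char)
    (g : List (Bool × String)) (flag : Bool) :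
    List.foldl aStep (cached, g, flag) l =
      ((List.foldl aStep (cached, [], flag) l).1,
       g ++ (List.foldl aStep (cached, [], flag) l).2.1,
       (List.foldl aStep (cached, [], flag) l).2.2) := by
  induction l generalizing cached g flag with
  | nil => simp
  | cons c rest ih =>
    rcases ha : aStep (cached, [], flag) c with ⟨x, gs, f⟩
    have h : aStep (cached, g, flag) c = (x, g ++ gs, f) := by
      unfold aStep at ha ⊢
      split_ifs at ha ⊢ <;> simp_all
    rw [List.foldl_cons, List.foldl_cons, h, ha, ih x (g ++ gs) f, ih x gs f]
    simp

theorem aFinish_append (x : List Char) (g gs : List (Bool × String)) (f : Bool) :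
    aFinish (x, g ++ gs, f) = g ++ aFinish (x, gs, f) := by
  unfold aFinish; split_ifs <;> simp

-- A's loop over a plain run just accumulates the run into cached
theorem foldl_aStep_run (rest : List Char) (cached : List Char) :
    List.foldl aStep (cached, [], false) rest =
      List.foldl aStep (cached ++ (altRun rest).1, [], false) (altRun rest).2 := by
  induction rest generalizing cached with
  | nil => simp [altRun]
  | cons d tail ih =>
    rw [altRun]
    split
    · simp
    · rename_i hd
      rw [not_or, not_or, not_or] at hd
      obtain ⟨h1, h2, h3, h4⟩ := hd
      have hstep : aStep (cached, [], false) d = (cached ++ [d], [], false) := by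
        unfold aStep; simp [h1, h2, h3, h4]
      rw [List.foldl_cons, hstep, ih (cached ++ [d])]
      simp

theorem main_lemma (n : Nat) (l : List Char) (cached : List Char) (hn : l.length ≤ n) :
    aFinish (List.foldl aStep (cached, [], false) l) = altGo l cached := by
  induction n generalizing l cached with
  | zero =>
    have : l = [] := List.eq_nil_of_length_eq_zero (Nat.le_zero.mp hn)
    subst this
    rw [altGo_nil]; rfl
  | succ n ih =>
    match l with
    | [] => rw [altGo_nil]; rfl
    | c :: rest =>
      rw [altGo_cons, List.foldl_cons]
      by_cases h1 : c = '\\'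
      · have hstep : aStep (cached, [], false) c = (cached, [], true) := by
          unfold aStep; simp [h1]
        rw [hstep, if_pos h1]
        match rest with
        | [] => rw [altGo_nil]; rfl
        | d :: rest' =>
          have hstep2 : aStep (cached, [], true) d = (cached ++ [d], [], false) := by
            unfold aStep; simp
          rw [List.foldl_cons, hstep2]
          exact ih rest' (cached ++ [d]) (by simp at hn; omega)
      · rw [if_neg h1]
        by_cases h2 : c = '\n'
        · have hstep : aStep (cached, [], false) c =
              ([], [(false, String.ofList cached), (true, "br")], false) := by
            unfold aStep; simp [h2]
          rw [hstep, if_pos h2, foldl_aStep_groups]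
          rw [aFinish_append]
          rw [ih rest [] (by simp at hn; omega)]
          rfl
        · rw [if_neg h2]
          by_cases h3 : c = '<'
          · have hstep : aStep (cached, [], false) c =
                ([], [(false, String.ofList cached)], false) := by
              unfold aStep; simp [h3]
            rw [hstep, if_pos h3, foldl_aStep_groups, aFinish_append,
                ih rest [] (by simp at hn; omega)]
            rfl
          · rw [if_neg h3]
            by_cases h4 : c = '>'
            · have hstep : aStep (cached, [], false) c =
                  ([], [(true, String.ofList cached)], false) := by
                unfold aStep; simp [h4]
              rw [hstep, if_pos h4, foldl_aStep_groups, aFinish_append,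
                  ih rest [] (by simp at hn; omega)]
              rfl
            · have hstep : aStep (cached, [], false) c = (cached ++ [c], [], false) := by
                unfold aStep; simp [h1, h2, h3, h4]
              rw [hstep, if_neg h4, foldl_aStep_run]
              have hlen : (altRun rest).2.length ≤ n := by
                have := altRun_len rest; simp at hn; omega
              rw [ih (altRun rest).2 (cached ++ [c] ++ (altRun rest).1) hlen]
              simp

-- ===== VERDICT (by name: the statement is the Claim_ definition above) =====
theorem parse_to_group_spec : Claim_equal_parse_to_group := by
  intro text _
  unfold Spec_parse_to_group parse_to_group parse_to_group_alt
  exact main_lemma _ _ [] le_rfl
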